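-- pv_equiv track=rewrite | github.com/imjohnlouie04/Arms-Engine | arms_engine/init_arms.py | extract_first_meaningful_paragraph
-- ===== SOURCE A (Python) =====
-- def extract_first_meaningful_paragraph(text):
--     lines = text.splitlines()
--     paragraph = []
--     in_code_block = False
--
--     for raw_line in lines:
--         line = raw_line.strip()
--
--         if line.startswith("```"):
--             in_code_block = not in_code_block
--             continue
--         if in_code_block:
--             continue
--
--         if not line:
--             if paragraph:
--                 break
--             continue
--
--         if (
--             line.startswith("#")
--             or line.startswith("|")
--             or line.startswith("- ")
--             or line.startswith("* ")
--             or line.startswith("> ")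
--         ):
--             if paragraph:
--                 break
--             continue
--
--         paragraph.append(line)
--
--     return " ".join(paragraph).strip()
-- ===== SOURCE B (Python) =====
-- def _is_boundary(line):
--     return (not line
--             or line.startswith("#")
--             or line.startswith("|")
--             or line.startswith("- ")
--             or line.startswith("* ")
--             or line.startswith("> "))
--
--
-- def extract_first_meaningful_paragraph(text):
--     # pass 1: drop fence lines and everything inside code blocks,
--     # keeping the stripped remaining lines
--     content = []
--     in_code = False
--     for raw in text.splitlines():
--         line = raw.strip()
--         if line.startswith("```"):
--             in_code = not in_code
--         elif not in_code:
--             content.append(line)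
--     # pass 2: skip leading boundary lines, then take until the next boundary
--     i = 0
--     while i < len(content) and _is_boundary(content[i]):
--         i += 1
--     j = i
--     while j < len(content) and not _is_boundary(content[j]):
--         j += 1
--     return " ".join(content[i:j]).strip()
-- ===== Notes on version B (the rewrite author's own statement) =====
-- stated objective: alternative
-- what changed: Replaced A's single stateful loop (paragraph accumulator with break-on-boundary logic interleaved with code-fence tracking) by two passes: pass 1 filters out fence/code lines producing a content list, pass 2 locates the paragraph as a skip-boundaries/take-until-boundary slice of that list.
import Mathlib
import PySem

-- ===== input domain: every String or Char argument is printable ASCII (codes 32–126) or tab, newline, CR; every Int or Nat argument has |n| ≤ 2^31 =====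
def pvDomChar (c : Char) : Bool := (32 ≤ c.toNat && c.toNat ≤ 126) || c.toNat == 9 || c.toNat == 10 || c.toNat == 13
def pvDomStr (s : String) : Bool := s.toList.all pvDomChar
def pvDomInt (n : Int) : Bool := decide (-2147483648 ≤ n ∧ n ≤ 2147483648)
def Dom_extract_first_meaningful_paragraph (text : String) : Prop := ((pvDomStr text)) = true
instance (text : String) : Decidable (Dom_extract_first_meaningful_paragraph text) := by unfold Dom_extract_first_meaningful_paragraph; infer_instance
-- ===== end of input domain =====

-- B restructures A's single break-driven loop into two passes (filter code lines, then
-- slice out the paragraph); same O(n) cost, objective: alternative decomposition.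

-- ===== PORT A =====
-- A's single loop: state = (paragraph so far, in_code_block); early 'break' returns para.
def pvLoopA : List (List Char) → List (List Char) → Bool → List (List Char)
  | [], para, _ => para
  | raw :: ls, para, inc =>
    let line := PySem.Chars.strip raw
    if PySem.Chars.startswith line ['`', '`', '`'] then pvLoopA ls para (!inc)
    else if inc then pvLoopA ls para inc
    else if line.isEmpty then (if para.isEmpty then pvLoopA ls para inc else para)
    else if PySem.Chars.startswith line ['#'] || PySem.Chars.startswith line ['|'] ||
            PySem.Chars.startswith line ['-', ' '] || PySem.Chars.startswith line ['*', ' '] ||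
            PySem.Chars.startswith line ['>', ' '] then
      (if para.isEmpty then pvLoopA ls para inc else para)
    else pvLoopA ls (para ++ [line]) inc

def extract_first_meaningful_paragraph (text : String) : String :=
  String.ofList (PySem.Chars.strip
    (PySem.Chars.join [' '] (pvLoopA (PySem.Chars.splitlines text.toList) [] false)))

-- ===== PORT B =====
def pvBoundary (s : List Char) : Bool :=
  s.isEmpty || PySem.Chars.startswith s ['#'] || PySem.Chars.startswith s ['|'] ||
  PySem.Chars.startswith s ['-', ' '] || PySem.Chars.startswith s ['*', ' '] ||
  PySem.Chars.startswith s ['>', ' ']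

-- pass 1: drop fences and code-block content, keep stripped lines
def pvPass1 : List (List Char) → Bool → List (List Char)
  | [], _ => []
  | raw :: ls, inc =>
    let line := PySem.Chars.strip raw
    if PySem.Chars.startswith line ['`', '`', '`'] then pvPass1 ls (!inc)
    else if !inc then line :: pvPass1 ls inc
    else pvPass1 ls inc

def extract_first_meaningful_paragraph_alt (text : String) : String :=
  let content := pvPass1 (PySem.Chars.splitlines text.toList) false
  -- pass 2: the two index-advancing while loops of Source B = dropWhile then takeWhile
  let para := (content.dropWhile pvBoundary).takeWhile (fun s => !pvBoundary s)
  String.ofList (PySem.Chars.strip (PySem.Chars.join [' '] para))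

-- ===== PRECONDITION & SPEC =====
def Spec_extract_first_meaningful_paragraph (text : String) (out : String) : Prop := out = extract_first_meaningful_paragraph_alt text
instance (text : String) (out : String) : Decidable (Spec_extract_first_meaningful_paragraph text out) := by unfold Spec_extract_first_meaningful_paragraph; infer_instance

-- ===== CLAIM (what is proved, stated in full; the proofs are below) =====
def Claim_equal_extract_first_meaningful_paragraph : Prop := ∀ (text : String), Dom_extract_first_meaningful_paragraph text → Spec_extract_first_meaningful_paragraph text (extract_first_meaningful_paragraph text)

-- ===== LEMMAS AND PROOFS =====

-- once the paragraph is non-empty, A takes lines until the first boundary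
theorem pvLoopA_ne_nil (ls : List (List Char)) (para : List (List Char)) (inc : Bool)
    (h : para ≠ []) :
    pvLoopA ls para inc = para ++ (pvPass1 ls inc).takeWhile (fun s => !pvBoundary s) := by
  induction ls generalizing inc para with
  | nil => simp [pvLoopA, pvPass1]
  | cons raw ls ih =>
    simp only [pvLoopA, pvPass1]
    by_cases hf : PySem.Chars.startswith (PySem.Chars.strip raw) ['`', '`', '`']
    · simp [hf, ih _ _ h]
    · by_cases hinc : inc
      · simp [hf, hinc, ih _ _ h]
      · by_cases he : (PySem.Chars.strip raw).isEmpty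
        · have : pvBoundary (PySem.Chars.strip raw) = true := by simp [pvBoundary, he]
          simp [hf, hinc, he, h, List.takeWhile, this]
        · by_cases hb : PySem.Chars.startswith (PySem.Chars.strip raw) ['#'] ||
              PySem.Chars.startswith (PySem.Chars.strip raw) ['|'] ||
              PySem.Chars.startswith (PySem.Chars.strip raw) ['-', ' '] ||
              PySem.Chars.startswith (PySem.Chars.strip raw) ['*', ' '] ||
              PySem.Chars.startswith (PySem.Chars.strip raw) ['>', ' ']
          · have : pvBoundary (PySem.Chars.strip raw) = true := by
              simp only [pvBoundary, he, Bool.false_or]; exact hb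
            simp [hf, hinc, he, hb, h, List.takeWhile, this]
          · have : pvBoundary (PySem.Chars.strip raw) = false := by
              simp only [pvBoundary, he, Bool.false_or]; simpa using hb
            have h2 := ih (para ++ [PySem.Chars.strip raw]) false (by simp)
            simp [hf, hinc, he, hb, this, h2]

-- with an empty paragraph, A skips boundaries then takes until the next one
theorem pvLoopA_nil (ls : List (List Char)) (inc : Bool) :
    pvLoopA ls [] inc =
      ((pvPass1 ls inc).dropWhile pvBoundary).takeWhile (fun s => !pvBoundary s) := by
  induction ls generalizing inc with
  | nil => simp [pvLoopA, pvPass1]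
  | cons raw ls ih =>
    simp only [pvLoopA, pvPass1]
    by_cases hf : PySem.Chars.startswith (PySem.Chars.strip raw) ['`', '`', '`']
    · simp [hf, ih]
    · by_cases hinc : inc
      · simp [hf, hinc, ih]
      · by_cases he : (PySem.Chars.strip raw).isEmpty
        · have : pvBoundary (PySem.Chars.strip raw) = true := by simp [pvBoundary, he]
          simp [hf, hinc, he, List.dropWhile, this, ih]
        · by_cases hb : PySem.Chars.startswith (PySem.Chars.strip raw) ['#'] ||
              PySem.Chars.startswith (PySem.Chars.strip raw) ['|'] ||
              PySem.Chars.startswith (PySem.Chars.strip raw) ['-', ' '] ||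
              PySem.Chars.startswith (PySem.Chars.strip raw) ['*', ' '] ||
              PySem.Chars.startswith (PySem.Chars.strip raw) ['>', ' ']
          · have : pvBoundary (PySem.Chars.strip raw) = true := by
              simp only [pvBoundary, he, Bool.false_or]; exact hb
            simp [hf, hinc, he, hb, List.dropWhile, this, ih]
          · have hbf : pvBoundary (PySem.Chars.strip raw) = false := by
              simp only [pvBoundary, he, Bool.false_or]; simpa using hb
            have h2 := pvLoopA_ne_nil ls [PySem.Chars.strip raw] false (by simp)
            simp [hf, hinc, he, hb, List.dropWhile, List.takeWhile, hbf, h2]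

-- ===== VERDICT (by name: the statement is the Claim_ definition above) =====
theorem extract_first_meaningful_paragraph_spec : Claim_equal_extract_first_meaningful_paragraph := by
  intro text _
  unfold Spec_extract_first_meaningful_paragraph
  unfold extract_first_meaningful_paragraph extract_first_meaningful_paragraph_alt
  rw [pvLoopA_nil]
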